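-- pv_equiv track=rewrite | github.com/mijgame/AdventOfCode2020 | Day16b.py | guess_rule
-- ===== SOURCE A (Python) =====
-- def check_bounds(value, bounds):
--     return bounds[0] <= value <= bounds[1]
--
-- def guess_rule(column, rules):
--     matching = []
--     for rule in rules:
--         matches = True
--         for value in column:
--             if not check_bounds(value, rule[1]) and not check_bounds(value, rule[2]):
--                 matches = False
--                 break
--         if matches:
--             matching.append(rule)
--     return matching
-- ===== SOURCE B (Python) =====
-- def guess_rule(column, rules):
--     # Transposed iteration: maintain a shrinking ordered list of candidate
--     # rules, dropping rules rejected by each value; break early when empty.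
--     candidates = list(rules)
--     for value in column:
--         candidates = [r for r in candidates
--                       if r[1][0] <= value <= r[1][1] or r[2][0] <= value <= r[2][1]]
--         if not candidates:
--             break
--     return candidates
-- ===== Notes on version B (the rewrite author's own statement) =====
-- stated objective: alternative
-- what changed: Transposes the iteration: instead of testing every rule against all column values (rules-outer, values-inner with a break), B maintains a shrinking ordered candidate list, filtering it by each column value in turn and breaking early once it is empty.
import Mathlib
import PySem

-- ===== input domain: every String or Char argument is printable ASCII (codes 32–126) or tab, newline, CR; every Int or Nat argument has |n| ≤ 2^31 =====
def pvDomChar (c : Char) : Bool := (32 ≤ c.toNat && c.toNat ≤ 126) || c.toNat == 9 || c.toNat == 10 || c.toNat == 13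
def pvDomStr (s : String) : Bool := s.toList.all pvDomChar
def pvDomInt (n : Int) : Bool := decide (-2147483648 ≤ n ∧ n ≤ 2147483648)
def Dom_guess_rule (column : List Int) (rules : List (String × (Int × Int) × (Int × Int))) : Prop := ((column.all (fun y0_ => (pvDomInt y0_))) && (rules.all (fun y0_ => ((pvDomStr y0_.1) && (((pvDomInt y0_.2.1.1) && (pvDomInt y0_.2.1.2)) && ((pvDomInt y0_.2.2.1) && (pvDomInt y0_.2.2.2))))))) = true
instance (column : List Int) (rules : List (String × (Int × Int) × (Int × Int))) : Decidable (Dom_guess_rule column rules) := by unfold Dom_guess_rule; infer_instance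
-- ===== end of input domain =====

-- B transposes the iteration (values-outer over a shrinking ordered candidate list, with early exit) instead of A's rules-outer scan; same cost, different traversal.


-- ===== PORT A =====
def check_bounds (value : Int) (bounds : Int × Int) : Bool :=
  decide (bounds.1 ≤ value) && decide (value ≤ bounds.2)

-- A's inner 'for value in column' loop with its break (matches flag)
def aMatchesLoop (rule : String × (Int × Int) × (Int × Int)) : List Int → Bool
  | [] => true
  | value :: rest =>
      if !check_bounds value rule.2.1 && !check_bounds value rule.2.2 then false
      else aMatchesLoop rule rest

def guess_rule (column : List Int) (rules : List (String × (Int × Int) × (Int × Int))) : List (String × (Int × Int) × (Int × Int)) :=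
  rules.foldl (fun matching rule =>
    if aMatchesLoop rule column then matching ++ [rule] else matching) []

-- ===== PORT B =====
-- does value fit either bound pair of the rule (B's list-comprehension condition)
def bAccepts (value : Int) (r : String × (Int × Int) × (Int × Int)) : Bool :=
  (decide (r.2.1.1 ≤ value) && decide (value ≤ r.2.1.2)) ||
  (decide (r.2.2.1 ≤ value) && decide (value ≤ r.2.2.2))

-- B's values-outer loop over the shrinking candidate list, with early break
def bLoop : List Int → List (String × (Int × Int) × (Int × Int)) → List (String × (Int × Int) × (Int × Int))
  | [], candidates => candidates
  | value :: rest, candidates =>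
      let candidates' := candidates.filter (fun r => bAccepts value r)
      if candidates'.isEmpty then candidates' else bLoop rest candidates'

def guess_rule_alt (column : List Int) (rules : List (String × (Int × Int) × (Int × Int))) : List (String × (Int × Int) × (Int × Int)) :=
  bLoop column rules

-- ===== PRECONDITION & SPEC =====
def Spec_guess_rule (column : List Int) (rules : List (String × (Int × Int) × (Int × Int))) (out : List (String × (Int × Int) × (Int × Int))) : Prop := out = guess_rule_alt column rules
instance (column : List Int) (rules : List (String × (Int × Int) × (Int × Int))) (out : List (String × (Int × Int) × (Int × Int))) : Decidable (Spec_guess_rule column rules out) := by unfold Spec_guess_rule; infer_instance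

-- ===== CLAIM (what is proved, stated in full; the proofs are below) =====
def Claim_equal_guess_rule : Prop := ∀ (column : List Int) (rules : List (String × (Int × Int) × (Int × Int))), Dom_guess_rule column rules → Spec_guess_rule column rules (guess_rule column rules)

-- ===== LEMMAS AND PROOFS =====

-- A's inner loop is the 'all values accepted' predicate
theorem aMatchesLoop_eq_all (rule : String × (Int × Int) × (Int × Int)) (column : List Int) :
    aMatchesLoop rule column = column.all (fun v => bAccepts v rule) := by
  induction column with
  | nil => rfl
  | cons v rest ih =>
      rw [aMatchesLoop, ih, List.all_cons]
      have hneg : (!check_bounds v rule.2.1 && !check_bounds v rule.2.2) = !(bAccepts v rule) := by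
        simp [check_bounds, bAccepts]
      rw [hneg]
      cases hb : bAccepts v rule <;> simp

-- A's append-accumulator fold is a filter
theorem foldl_append_filter (p : (String × (Int × Int) × (Int × Int)) → Bool)
    (rules acc : List (String × (Int × Int) × (Int × Int))) :
    rules.foldl (fun matching rule => if p rule then matching ++ [rule] else matching) acc
      = acc ++ rules.filter p := by
  induction rules generalizing acc with
  | nil => simp
  | cons r rest ih =>
      simp only [List.foldl_cons, List.filter_cons]
      by_cases h : p r <;> simp [h, ih]

-- B's loop computes the filter by the conjunction of all values
theorem bLoop_eq_filter (column : List Int) (cs : List (String × (Int × Int) × (Int × Int))) :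
    bLoop column cs = cs.filter (fun r => column.all (fun v => bAccepts v r)) := by
  induction column generalizing cs with
  | nil => simp [bLoop]
  | cons v rest ih =>
      show (if (cs.filter (fun r => bAccepts v r)).isEmpty then cs.filter (fun r => bAccepts v r)
            else bLoop rest (cs.filter (fun r => bAccepts v r)))
          = cs.filter (fun r => (v :: rest).all fun w => bAccepts w r)
      by_cases h : (cs.filter (fun r => bAccepts v r)).isEmpty
      · rw [if_pos h]
        rw [List.isEmpty_iff] at h
        have hnil : cs.filter (fun r => (v :: rest).all fun w => bAccepts w r) = [] := by
          rw [List.filter_eq_nil_iff] at h ⊢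
          intro a ha hall
          simp only [List.all_cons, Bool.and_eq_true] at hall
          exact h a ha hall.1
        rw [h, hnil]
      · rw [if_neg h, ih, List.filter_filter]
        congr 1
        funext r
        simp [Bool.and_comm]

-- ===== VERDICT (by name: the statement is the Claim_ definition above) =====
theorem guess_rule_spec : Claim_equal_guess_rule := by
  intro column rules _
  unfold Spec_guess_rule guess_rule guess_rule_alt
  rw [foldl_append_filter, bLoop_eq_filter, List.nil_append]
  congr 1
  funext r
  exact aMatchesLoop_eq_all r column
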